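-- pv_equiv track=rewrite | github.com/nh36/qin-rhyme-parser | main.py | find_rhyme_set
-- ===== SOURCE A (Python) =====
-- def find_rhyme_set(token, gloss_char, rhyme_sets):
--     """
--     Find which rhyme set this token belongs to.
--
--     Rule D: Try matching token first, then gloss_char.
--     """
--     if not rhyme_sets:
--         return None
--
--     # Try exact token match first
--     for rset in rhyme_sets:
--         if token in rset['words']:
--             return rset
--
--     # Try gloss character if available
--     if gloss_char:
--         for rset in rhyme_sets:
--             if gloss_char in rset['words']:
--                 return rset
--
--     return None
-- ===== SOURCE B (Python) =====
-- def find_rhyme_set(token, gloss_char, rhyme_sets):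
--     """Single pass: return on token match immediately; remember the first
--     gloss_char match as a fallback and return it after the loop."""
--     gloss_match = None
--     for rset in rhyme_sets:
--         words = rset['words']
--         if token in words:
--             return rset
--         if gloss_char and gloss_match is None and gloss_char in words:
--             gloss_match = rset
--     return gloss_match
-- ===== Notes on version B (the rewrite author's own statement) =====
-- stated objective: simpler
-- what changed: Replaces A's emptiness guard plus two separate scans (token scan, then gloss scan) with one single pass that returns immediately on a token match and remembers the first gloss match as a fallback candidate.
import Mathlib
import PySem

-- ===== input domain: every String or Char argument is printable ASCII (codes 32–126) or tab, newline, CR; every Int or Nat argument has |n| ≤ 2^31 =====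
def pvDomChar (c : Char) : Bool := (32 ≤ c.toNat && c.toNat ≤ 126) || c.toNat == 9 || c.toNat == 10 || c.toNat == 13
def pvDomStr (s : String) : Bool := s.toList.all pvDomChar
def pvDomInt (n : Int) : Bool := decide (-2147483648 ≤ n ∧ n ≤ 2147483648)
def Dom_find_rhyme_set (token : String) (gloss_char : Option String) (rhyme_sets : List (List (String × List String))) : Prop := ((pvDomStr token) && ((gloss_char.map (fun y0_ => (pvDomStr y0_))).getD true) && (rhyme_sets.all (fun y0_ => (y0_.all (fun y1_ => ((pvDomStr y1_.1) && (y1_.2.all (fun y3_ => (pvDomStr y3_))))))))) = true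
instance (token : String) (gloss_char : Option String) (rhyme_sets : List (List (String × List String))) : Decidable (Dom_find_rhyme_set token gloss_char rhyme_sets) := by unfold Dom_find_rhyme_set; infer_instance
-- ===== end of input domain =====

-- B collapses A's two scans into one pass with a remembered gloss fallback (objective: simpler).

-- rset['words']: first-match assoc-list lookup; on a missing key Python raises KeyError
-- (those inputs are outside Pre_), the port totalises with [] there.
def pvWords (r : List (String × List String)) : List String :=
  (r.lookup "words").getD []

-- ===== PORT A =====
-- A's 'for rset in rhyme_sets: if key in rset["words"]: return rset' loop (used for both scans)
def pvScanA (key : String) : List (List (String × List String)) → Option (List (String × List String))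
  | [] => none
  | r :: rest => if key ∈ pvWords r then some r else pvScanA key rest

def find_rhyme_set (token : String) (gloss_char : Option String) (rhyme_sets : List (List (String × List String))) : Option (List (String × List String)) :=
  if rhyme_sets = [] then none
  else
    match pvScanA token rhyme_sets with
    | some r => some r
    | none =>
      match gloss_char with            -- 'if gloss_char:' — truthy = present and non-empty
      | some g => if g ≠ "" then pvScanA g rhyme_sets else none
      | none => none

-- ===== PORT B =====
def pvAltLoop (token : String) (gloss_char : Option String)
    (gloss_match : Option (List (String × List String))) :
    List (List (String × List String)) → Option (List (String × List String))
  | [] => gloss_match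
  | r :: rest =>
    let words := pvWords r
    if token ∈ words then some r
    else
      match gloss_char with
      | some g =>
        if g ≠ "" ∧ gloss_match = none ∧ g ∈ words then
          pvAltLoop token gloss_char (some r) rest
        else pvAltLoop token gloss_char gloss_match rest
      | none => pvAltLoop token gloss_char gloss_match rest

def find_rhyme_set_alt (token : String) (gloss_char : Option String) (rhyme_sets : List (List (String × List String))) : Option (List (String × List String)) :=
  pvAltLoop token gloss_char none rhyme_sets

-- ===== PRECONDITION & SPEC =====
def pvHasWords (r : List (String × List String)) : Bool := (r.lookup "words").isSome

-- Pre_ excludes exactly the inputs on which Python A raises KeyError: A returns normally iff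
-- every rhyme set has a 'words' key, or the token is found before the first set lacking one.
def Pre_find_rhyme_set (token : String) (gloss_char : Option String) (rhyme_sets : List (List (String × List String))) : Prop :=
  rhyme_sets.all pvHasWords = true ∨ ∃ r ∈ rhyme_sets.takeWhile pvHasWords, token ∈ pvWords r
instance (token : String) (gloss_char : Option String) (rhyme_sets : List (List (String × List String))) : Decidable (Pre_find_rhyme_set token gloss_char rhyme_sets) := by unfold Pre_find_rhyme_set; infer_instance

def pvWitness_find_rhyme_set : String × Option String × (List (List (String × List String))) :=
  ("pa", some "b", [[("words", ["ma", "b"])], [("words", ["pa"])]])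

def Spec_find_rhyme_set (token : String) (gloss_char : Option String) (rhyme_sets : List (List (String × List String))) (out : Option (List (String × List String))) : Prop := out = find_rhyme_set_alt token gloss_char rhyme_sets
instance (token : String) (gloss_char : Option String) (rhyme_sets : List (List (String × List String))) (out : Option (List (String × List String))) : Decidable (Spec_find_rhyme_set token gloss_char rhyme_sets out) := by unfold Spec_find_rhyme_set; infer_instance

-- ===== CLAIM (what is proved, stated in full; the proofs are below) =====
def Claim_equal_find_rhyme_set : Prop := ∀ (token : String) (gloss_char : Option String) (rhyme_sets : List (List (String × List String))), Dom_find_rhyme_set token gloss_char rhyme_sets → Pre_find_rhyme_set token gloss_char rhyme_sets → Spec_find_rhyme_set token gloss_char rhyme_sets (find_rhyme_set token gloss_char rhyme_sets)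

-- ===== LEMMAS AND PROOFS =====

-- A's gloss fallback, as one expression
def pvGloss (gloss_char : Option String) (rsets : List (List (String × List String))) : Option (List (String × List String)) :=
  match gloss_char with
  | some g => if g ≠ "" then pvScanA g rsets else none
  | none => none

theorem pvAltLoop_eq (token : String) (gloss_char : Option String)
    (rsets : List (List (String × List String)))
    (acc : Option (List (String × List String))) :
    pvAltLoop token gloss_char acc rsets =
      ((pvScanA token rsets).orElse
        (fun _ => acc.orElse (fun _ => pvGloss gloss_char rsets))) := by
  induction rsets generalizing acc with
  | nil =>
    cases acc <;> cases gloss_char <;> simp [pvAltLoop, pvScanA, pvGloss] <;> split <;> rfl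
  | cons r rest ih =>
    by_cases htok : token ∈ pvWords r
    · simp [pvAltLoop, pvScanA, htok]
    · cases gloss_char with
      | none =>
        simp [pvAltLoop, pvScanA, htok, ih, pvGloss]
      | some g =>
        by_cases hcond : g ≠ "" ∧ acc = none ∧ g ∈ pvWords r
        · obtain ⟨hg, hacc, hmem⟩ := hcond
          simp [pvAltLoop, pvScanA, htok, hg, hacc, hmem, ih, pvGloss]
        · have hstep : pvAltLoop token (some g) acc (r :: rest) =
              pvAltLoop token (some g) acc rest := by
            simp [pvAltLoop, htok, hcond]
          have hscanr : pvScanA token (r :: rest) = pvScanA token rest := by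
            simp [pvScanA, htok]
          rw [hstep, ih, hscanr]
          cases acc with
          | some a => simp
          | none =>
            simp only [Option.orElse]
            by_cases hg : g = ""
            · simp [pvGloss, hg]
            · have hmem : g ∉ pvWords r := by
                intro hm; exact hcond ⟨hg, rfl, hm⟩
              simp [pvGloss, hg, pvScanA, hmem]

theorem find_rhyme_set_spec : Claim_equal_find_rhyme_set := by
  intro token gloss_char rhyme_sets _ _
  show find_rhyme_set token gloss_char rhyme_sets = find_rhyme_set_alt token gloss_char rhyme_sets
  rw [find_rhyme_set_alt, pvAltLoop_eq]
  unfold find_rhyme_set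
  by_cases hnil : rhyme_sets = []
  · subst hnil; cases gloss_char <;> simp [pvScanA, pvGloss]
  · rw [if_neg hnil]
    cases hscan : pvScanA token rhyme_sets with
    | some r => simp
    | none => cases gloss_char <;> simp [pvGloss, Option.orElse]
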